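-- pv_equiv track=rewrite | github.com/lth2015/slash | apps/api/slash_api/routers/help.py | _filter_suggestions
-- ===== SOURCE A (Python) =====
-- def _filter_suggestions(cmds: list[str], catalog: list[dict]) -> list[str]:
--     """Drop any suggestion whose `/namespace verb` prefix doesn't appear in
--     the catalog. Prevents the LLM from quietly inventing skills."""
--     allowed_heads: set[str] = set()
--     for entry in catalog:
--         inv = entry.get("invocation", "")
--         # Head is the token-prefix up through the verb (no flags / positional
--         # placeholders). E.g. `/cluster scale` or `/infra aws vm list`.
--         tokens = inv.split(" ")
--         head: list[str] = []
--         for t in tokens: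
--             if t.startswith("[") or t.startswith("<"):
--                 break
--             head.append(t)
--         allowed_heads.add(" ".join(head))
--     out: list[str] = []
--     for raw in cmds or []:
--         s = str(raw).strip()
--         if not s.startswith("/"):
--             continue
--         # Accept if any allowed head is a prefix.
--         if any(s == h or s.startswith(h + " ") for h in allowed_heads):
--             out.append(s)
--     return out[:6]
-- ===== SOURCE B (Python) =====
-- def _filter_suggestions(cmds: list[str], catalog: list[dict]) -> list[str]:
--     # Build the set of allowed heads once, then test each command by walking
--     # its own space-split tokens and probing each growing prefix against the
--     # set (hash lookups instead of scanning every head per command); stop as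
--     # soon as six suggestions have been accepted.
--     allowed_heads = set()
--     for entry in catalog:
--         tokens = entry.get("invocation", "").split(" ")
--         k = 0
--         while k < len(tokens) and not tokens[k].startswith(("[", "<")):
--             k += 1
--         allowed_heads.add(" ".join(tokens[:k]))
--     out = []
--     for raw in cmds or []:
--         if len(out) == 6:
--             break
--         s = str(raw).strip()
--         if not s.startswith("/"):
--             continue
--         pref = None
--         for tok in s.split(" "):
--             pref = tok if pref is None else pref + " " + tok
--             if pref in allowed_heads:
--                 out.append(s)
--                 break
--     return out
-- ===== Notes on version B (the rewrite author's own statement) =====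
-- stated objective: alternative
-- what changed: Instead of testing every allowed head against every command with string-prefix checks, B walks each command's space-split tokens once, probing each growing prefix against the head set by hash lookup, and stops as soon as six commands are accepted.
import Mathlib
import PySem

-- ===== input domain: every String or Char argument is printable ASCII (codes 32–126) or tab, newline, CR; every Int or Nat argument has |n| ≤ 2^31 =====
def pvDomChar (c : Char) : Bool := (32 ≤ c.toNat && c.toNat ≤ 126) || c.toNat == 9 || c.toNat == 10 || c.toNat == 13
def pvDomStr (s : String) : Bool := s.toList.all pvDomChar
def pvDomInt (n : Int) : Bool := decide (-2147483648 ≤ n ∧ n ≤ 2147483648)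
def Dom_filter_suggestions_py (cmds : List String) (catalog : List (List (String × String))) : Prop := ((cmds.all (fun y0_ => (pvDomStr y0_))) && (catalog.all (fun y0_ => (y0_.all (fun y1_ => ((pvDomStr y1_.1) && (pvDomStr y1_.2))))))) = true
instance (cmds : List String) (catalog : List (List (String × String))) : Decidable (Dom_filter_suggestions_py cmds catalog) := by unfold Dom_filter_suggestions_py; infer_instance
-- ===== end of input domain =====

-- B replaces A's inner scan over all allowed heads (one string-prefix test per head per command) by a
-- single head set probed with each command's growing space-split token prefixes, stopping after six hits.

-- shared primitive: `s.split(" ")` (the separator is the literal " ", so split? is always `some`)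
def pvSplitSp (s : String) : List String := (PySem.Str.split? s " ").getD []

-- ===== PORT A =====
-- A's inner loop `for t in tokens: if t.startswith("[") or t.startswith("<"): break; head.append(t)`
def pvHeadLoopA : List String → List String
  | [] => []
  | t :: ts =>
    if PySem.Str.startswith t "[" || PySem.Str.startswith t "<" then []
    else t :: pvHeadLoopA ts

-- A's first loop: the set `allowed_heads` built over the catalog
def pvAllowedA (catalog : List (List (String × String))) : PySem.Set String :=
  catalog.foldl (fun acc entry =>
    let inv := PySem.Dict.getD ⟨entry⟩ "invocation" ""
    let tokens := pvSplitSp inv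
    PySem.Set.add acc (PySem.Str.join " " (pvHeadLoopA tokens))) PySem.Set.empty

def filter_suggestions_py (cmds : List String) (catalog : List (List (String × String))) : List String :=
  (cmds.foldl (fun out raw =>
    let s := PySem.Str.strip raw
    if !PySem.Str.startswith s "/" then out
    else if (pvAllowedA catalog).any (fun h => s == h || PySem.Str.startswith s (h ++ " ")) then
      out ++ [s]
    else out) []).take 6

-- ===== PORT B =====
-- B's `while k < len(tokens) and not tokens[k].startswith(("[", "<")): k += 1`
def pvStopIdxB : List String → Nat
  | [] => 0
  | t :: ts =>
    if PySem.Str.startswith t "[" || PySem.Str.startswith t "<" then 0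
    else pvStopIdxB ts + 1

-- B's head-set loop over the catalog
def pvHeadsB (catalog : List (List (String × String))) : PySem.Set String :=
  catalog.foldl (fun acc entry =>
    let tokens := pvSplitSp (PySem.Dict.getD ⟨entry⟩ "invocation" "")
    PySem.Set.add acc (PySem.Str.join " " (tokens.take (pvStopIdxB tokens)))) PySem.Set.empty

-- B's `pref = None; for tok in s.split(" "): pref = ...; if pref in allowed_heads: append; break`
def pvScanB (heads : PySem.Set String) : Option String → List String → Bool
  | _, [] => false
  | pref, tok :: toks =>
    let p := match pref with
      | none => tok
      | some q => q ++ " " ++ tok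
    if PySem.Set.contains heads p then true else pvScanB heads (some p) toks

-- B's main loop with its `if len(out) == 6: break`
def pvLoopB (heads : PySem.Set String) : List String → List String → List String
  | out, [] => out
  | out, raw :: rest =>
    if out.length == 6 then out
    else
      let s := PySem.Str.strip raw
      if !PySem.Str.startswith s "/" then pvLoopB heads out rest
      else if pvScanB heads none (pvSplitSp s) then pvLoopB heads (out ++ [s]) rest
      else pvLoopB heads out rest

def filter_suggestions_py_alt (cmds : List String) (catalog : List (List (String × String))) : List String :=
  pvLoopB (pvHeadsB catalog) [] cmds

-- ===== PRECONDITION & SPEC =====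
def Spec_filter_suggestions_py (cmds : List String) (catalog : List (List (String × String))) (out : List String) : Prop := out = filter_suggestions_py_alt cmds catalog
instance (cmds : List String) (catalog : List (List (String × String))) (out : List String) : Decidable (Spec_filter_suggestions_py cmds catalog out) := by unfold Spec_filter_suggestions_py; infer_instance

-- ===== CLAIM (what is proved, stated in full; the proofs are below) =====
def Claim_equal_filter_suggestions_py : Prop := ∀ (cmds : List String) (catalog : List (List (String × String))), Dom_filter_suggestions_py cmds catalog → Spec_filter_suggestions_py cmds catalog (filter_suggestions_py cmds catalog)

-- ===== LEMMAS AND PROOFS =====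

-- B's while-loop head is A's break-loop head
theorem pv_head_eq (ts : List String) : ts.take (pvStopIdxB ts) = pvHeadLoopA ts := by
  induction ts with
  | nil => rfl
  | cons t ts ih =>
    simp only [pvStopIdxB, pvHeadLoopA]
    split <;> simp [ih]

-- hence the two head sets coincide
theorem pv_heads_eq (catalog : List (List (String × String))) :
    pvHeadsB catalog = pvAllowedA catalog := by
  unfold pvHeadsB pvAllowedA
  apply PySem.List.foldl_congr_mem
  intro acc entry _
  dsimp only
  rw [pv_head_eq]

-- the splitOn.go invariant: splitting on " " yields a nonempty list of space-free
-- tokens whose " "-join is the original string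
theorem pv_go_spec (fuel : Nat) (l cur : List Char) (acc : List (List Char)) (hf : l.length < fuel) :
    ∃ ts, PySem.Chars.splitOn.go [' '] fuel l cur acc = acc.reverse ++ ts ∧ ts ≠ [] ∧
      PySem.Chars.join [' '] ts = cur.reverse ++ l ∧ (' ' ∉ cur → ∀ t ∈ ts, ' ' ∉ t) := by
  induction fuel generalizing l cur acc with
  | zero => omega
  | succ fuel ih =>
    cases l with
    | nil =>
      refine ⟨[cur.reverse], ?_, by simp, by simp [PySem.Chars.join_singleton], ?_⟩
      · simp [PySem.Chars.splitOn.go]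
      · intro h t ht; simp at ht; subst ht; simpa using h
    | cons c rest =>
      by_cases hc : c = ' '
      · subst hc
        have hstep : PySem.Chars.splitOn.go [' '] (fuel+1) (' ' :: rest) cur acc =
            PySem.Chars.splitOn.go [' '] fuel rest [] (cur.reverse :: acc) := by
          simp [PySem.Chars.splitOn.go, List.isPrefixOf]
        obtain ⟨ts', heq, hne, hjoin, hsp⟩ := ih rest [] (cur.reverse :: acc) (by simp at hf ⊢; omega)
        refine ⟨cur.reverse :: ts', ?_, by simp, ?_, ?_⟩
        · rw [hstep, heq]; simp
        · cases ts' with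
          | nil => exact absurd rfl hne
          | cons b l' =>
            rw [PySem.Chars.join_cons_cons, hjoin]; simp
        · intro h t ht
          rcases List.mem_cons.mp ht with rfl | h2
          · simpa using h
          · exact hsp (by simp) _ h2
      · have hstep : PySem.Chars.splitOn.go [' '] (fuel+1) (c :: rest) cur acc =
            PySem.Chars.splitOn.go [' '] fuel rest (c :: cur) acc := by
          simp [PySem.Chars.splitOn.go, List.isPrefixOf, Ne.symm hc]
        obtain ⟨ts', heq, hne, hjoin, hsp⟩ := ih rest (c :: cur) acc (by simp at hf ⊢; omega)
        refine ⟨ts', by rw [hstep, heq], hne, by rw [hjoin]; simp, ?_⟩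
        intro h
        exact hsp (by simp [h, Ne.symm hc])

theorem pv_split_spec (s : List Char) :
    PySem.Chars.splitOn s [' '] ≠ [] ∧
      PySem.Chars.join [' '] (PySem.Chars.splitOn s [' ']) = s ∧
      ∀ t ∈ PySem.Chars.splitOn s [' '], ' ' ∉ t := by
  obtain ⟨ts, heq, hne, hjoin, hsp⟩ := pv_go_spec (s.length + 1) s [] [] (by omega)
  unfold PySem.Chars.splitOn
  rw [heq]
  simp_all

-- pvSplitSp on the char level
theorem pv_splitSp_toList (s : String) :
    (pvSplitSp s).map String.toList = PySem.Chars.splitOn s.toList [' '] := by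
  unfold pvSplitSp
  have h := PySem.Str.split?_map s " "
  cases hx : PySem.Str.split? s " " with
  | none => rw [hx] at h; simp [PySem.Chars.split?] at h
  | some v =>
    rw [hx] at h
    simp [PySem.Chars.split?] at h
    simpa using h

-- a prefix of a joined token list that ends just before a space splits at a separator
theorem pv_prefix_split (t H rest : List Char) (ht : ' ' ∉ t)
    (hp : H ++ [' '] <+: t ++ ' ' :: rest) :
    H = t ∨ ∃ H', H = t ++ ' ' :: H' ∧ H' ++ [' '] <+: rest := by
  induction t generalizing H with
  | nil =>
    cases H with
    | nil => exact Or.inl rfl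
    | cons c H1 =>
      right
      obtain ⟨u, hu⟩ := hp
      simp at hu
      obtain ⟨rfl, h2⟩ := hu
      exact ⟨H1, rfl, ⟨u, by simpa using h2⟩⟩
  | cons a t1 ih =>
    have ha : a ≠ ' ' := fun h => ht (by simp [h])
    have ht1 : ' ' ∉ t1 := fun h => ht (by simp [h])
    cases H with
    | nil =>
      obtain ⟨u, hu⟩ := hp
      simp at hu
      exact absurd hu.1.symm ha
    | cons c H1 =>
      obtain ⟨u, hu⟩ := hp
      simp at hu
      obtain ⟨rfl, h2⟩ := hu
      rcases ih H1 ht1 ⟨u, by simpa using h2⟩ with h | ⟨H', rfl, hh⟩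
      · exact Or.inl (by rw [h])
      · exact Or.inr ⟨H', rfl, hh⟩

-- the core correspondence: "H equals the string or H + ' ' prefixes it" ⟺ "H is the join of a token prefix"
theorem pv_cond_iff (ts : List (List Char)) (H : List Char) (hne : ts ≠ [])
    (hsp : ∀ t ∈ ts, ' ' ∉ t) :
    (PySem.Chars.join [' '] ts = H ∨ H ++ [' '] <+: PySem.Chars.join [' '] ts) ↔
      ∃ i, 1 ≤ i ∧ i ≤ ts.length ∧ H = PySem.Chars.join [' '] (ts.take i) := by
  induction ts generalizing H with
  | nil => exact absurd rfl hne
  | cons t ts' ih =>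
    have hts : ' ' ∉ t := hsp t (by simp)
    cases ts' with
    | nil =>
      rw [PySem.Chars.join_singleton]
      constructor
      · rintro (rfl | hp)
        · exact ⟨1, by simp [PySem.Chars.join_singleton]⟩
        · exact absurd (hp.subset (by simp)) hts
      · rintro ⟨i, h1, h2, rfl⟩
        simp at h2
        have : i = 1 := by omega
        subst this
        simp [PySem.Chars.join_singleton]
    | cons t' rest =>
      have hne' : (t' :: rest) ≠ [] := by simp
      have hsp' : ∀ u ∈ t' :: rest, ' ' ∉ u := fun u hu => hsp u (by simp [hu])
      rw [PySem.Chars.join_cons_cons]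
      constructor
      · rintro (rfl | hp)
        · refine ⟨(t' :: rest).length + 1, by omega, by simp, ?_⟩
          rw [List.take_of_length_le (by simp), PySem.Chars.join_cons_cons]
        · have hp' : H ++ [' '] <+: t ++ ' ' :: PySem.Chars.join [' '] (t' :: rest) := by
            simpa using hp
          rcases pv_prefix_split t H _ hts hp' with rfl | ⟨H', rfl, hh⟩
          · exact ⟨1, by simp [PySem.Chars.join_singleton]⟩
          · obtain ⟨i', hi1, hi2, rfl⟩ := (ih H' hne' hsp').mp (Or.inr hh)
            refine ⟨i' + 1, by omega, by simpa using hi2, ?_⟩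
            have : (t' :: rest).take i' ≠ [] := by
              cases i' with
              | zero => omega
              | succ n => simp
            rw [List.take_succ_cons]
            cases hx : (t' :: rest).take i' with
            | nil => exact absurd hx this
            | cons b l =>
              rw [PySem.Chars.join_cons_cons]
              simp
      · rintro ⟨i, h1, h2, rfl⟩
        cases i with
        | zero => omega
        | succ i' =>
          cases i' with
          | zero =>
            right
            simp [PySem.Chars.join_singleton, List.append_assoc]
          | succ j =>
            have hj : 1 ≤ j + 1 := by omega
            have hj2 : j + 1 ≤ (t' :: rest).length := by simpa using h2
            have hin := (ih (PySem.Chars.join [' '] ((t' :: rest).take (j+1))) hne' hsp').mpr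
              ⟨j + 1, hj, hj2, rfl⟩
            rw [List.take_succ_cons]
            cases hx : (t' :: rest).take (j+1) with
            | nil => simp at hx
            | cons b l =>
              rw [hx] at hin
              rw [PySem.Chars.join_cons_cons]
              rcases hin with heq | ⟨u, hu⟩
              · left; rw [heq]
              · right
                refine ⟨u, ?_⟩
                rw [← hu]
                simp

-- string-level join unfoldings
theorem pv_join_singleton (a : String) : PySem.Str.join " " [a] = a := by
  apply String.toList_inj.mp
  rw [PySem.Str.toList_join]
  simp [PySem.Chars.join_singleton]

theorem pv_join_cons (a b : String) (l : List String) :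
    PySem.Str.join " " (a :: b :: l) = a ++ " " ++ PySem.Str.join " " (b :: l) := by
  apply String.toList_inj.mp
  rw [PySem.Str.toList_join]
  simp only [List.map_cons]
  rw [PySem.Chars.join_cons_cons]
  simp [PySem.Str.toList_join]

-- pvScanB finds exactly the token-prefix joins that are in the set
theorem pv_scan_some (heads : PySem.Set String) (toks : List String) (q : String) :
    pvScanB heads (some q) toks = true ↔
      ∃ i, 1 ≤ i ∧ i ≤ toks.length ∧
        PySem.Set.contains heads (q ++ " " ++ PySem.Str.join " " (toks.take i)) = true := by
  induction toks generalizing q with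
  | nil => simp [pvScanB]
  | cons tok toks ih =>
    show (if PySem.Set.contains heads (q ++ " " ++ tok) then true
      else pvScanB heads (some (q ++ " " ++ tok)) toks) = true ↔ _
    by_cases hc : PySem.Set.contains heads (q ++ " " ++ tok) = true
    · rw [hc]
      simp only [if_true]
      constructor
      · intro _
        exact ⟨1, le_refl 1, by simp, by simpa [pv_join_singleton] using hc⟩
      · intro _; trivial
    · rw [Bool.not_eq_true] at hc
      rw [hc, if_neg (by simp)]
      rw [ih (q ++ " " ++ tok)]
      constructor
      · rintro ⟨i, h1, h2, h3⟩
        refine ⟨i + 1, by omega, by simp; omega, ?_⟩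
        rw [List.take_succ_cons]
        cases hx : toks.take i with
        | nil =>
          rcases List.take_eq_nil_iff.mp hx with rfl | rfl
          · omega
          · simp at h2; omega
        | cons b l =>
          rw [pv_join_cons]
          rw [hx] at h3
          simpa [String.append_assoc] using h3
      · rintro ⟨i, h1, h2, h3⟩
        cases i with
        | zero => omega
        | succ j =>
          cases j with
          | zero =>
            exfalso
            rw [List.take_succ_cons, List.take_zero, pv_join_singleton] at h3
            rw [hc] at h3
            simp at h3
          | succ k =>
            refine ⟨k + 1, by omega, by simpa using h2, ?_⟩
            rw [List.take_succ_cons] at h3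
            cases hx : toks.take (k+1) with
            | nil =>
              rcases List.take_eq_nil_iff.mp hx with h | rfl
              · omega
              · simp at h2
            | cons b l =>
              rw [hx] at h3
              rw [pv_join_cons] at h3
              simpa [String.append_assoc] using h3

theorem pv_scan_none (heads : PySem.Set String) (toks : List String) :
    pvScanB heads none toks = true ↔
      ∃ i, 1 ≤ i ∧ i ≤ toks.length ∧
        PySem.Set.contains heads (PySem.Str.join " " (toks.take i)) = true := by
  cases toks with
  | nil => simp [pvScanB]
  | cons tok toks =>
    show (if PySem.Set.contains heads tok then true
      else pvScanB heads (some tok) toks) = true ↔ _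
    by_cases hc : PySem.Set.contains heads tok = true
    · rw [hc]
      simp only [if_true]
      constructor
      · intro _
        exact ⟨1, le_refl 1, by simp, by simpa [pv_join_singleton] using hc⟩
      · intro _; trivial
    · rw [Bool.not_eq_true] at hc
      rw [hc, if_neg (by simp)]
      rw [pv_scan_some]
      constructor
      · rintro ⟨i, h1, h2, h3⟩
        refine ⟨i + 1, by omega, by simp; omega, ?_⟩
        rw [List.take_succ_cons]
        cases hx : toks.take i with
        | nil =>
          rcases List.take_eq_nil_iff.mp hx with rfl | rfl
          · omega
          · simp at h2; omega
        | cons b l =>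
          rw [pv_join_cons]
          rw [hx] at h3
          exact h3
      · rintro ⟨i, h1, h2, h3⟩
        cases i with
        | zero => omega
        | succ j =>
          cases j with
          | zero =>
            exfalso
            rw [List.take_succ_cons, List.take_zero, pv_join_singleton] at h3
            rw [hc] at h3
            simp at h3
          | succ k =>
            refine ⟨k + 1, by omega, by simpa using h2, ?_⟩
            rw [List.take_succ_cons] at h3
            cases hx : toks.take (k+1) with
            | nil =>
              rcases List.take_eq_nil_iff.mp hx with h | rfl
              · omega
              · simp at h2
            | cons b l =>
              rw [hx] at h3
              rw [pv_join_cons] at h3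
              exact h3

-- per-command decision agreement: A's any-over-heads equals B's prefix walk
theorem pv_decide_eq (heads : PySem.Set String) (s : String) :
    heads.any (fun h => s == h || PySem.Str.startswith s (h ++ " ")) =
      pvScanB heads none (pvSplitSp s) := by
  rw [Bool.eq_iff_iff, pv_scan_none, List.any_eq_true]
  obtain ⟨hne, hjoin, hsp⟩ := pv_split_spec s.toList
  have hmap := pv_splitSp_toList s
  have hlen : (pvSplitSp s).length = (PySem.Chars.splitOn s.toList [' ']).length := by
    rw [← hmap, List.length_map]
  have hjoin_take : ∀ i, (PySem.Str.join " " ((pvSplitSp s).take i)).toList =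
      PySem.Chars.join [' '] ((PySem.Chars.splitOn s.toList [' ']).take i) := by
    intro i
    rw [PySem.Str.toList_join, ← hmap, List.map_take]
    rfl
  have hcond : ∀ h : String, (s == h || PySem.Str.startswith s (h ++ " ")) = true ↔
      ∃ i, 1 ≤ i ∧ i ≤ (pvSplitSp s).length ∧ h = PySem.Str.join " " ((pvSplitSp s).take i) := by
    intro h
    rw [Bool.or_eq_true, beq_iff_eq, PySem.Str.startswith_eq, PySem.Chars.startswith_iff]
    have h1 : (s = h ∨ (h ++ " ").toList <+: s.toList) ↔
        (PySem.Chars.join [' '] (PySem.Chars.splitOn s.toList [' ']) = h.toList ∨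
          h.toList ++ [' '] <+: PySem.Chars.join [' '] (PySem.Chars.splitOn s.toList [' '])) := by
      rw [hjoin]
      constructor
      · rintro (rfl | hp)
        · exact Or.inl rfl
        · exact Or.inr (by simpa [String.toList_append] using hp)
      · rintro (he | hp)
        · exact Or.inl (String.toList_inj.mp he.symm).symm
        · exact Or.inr (by simpa [String.toList_append] using hp)
    rw [h1, pv_cond_iff _ _ hne hsp]
    constructor
    · rintro ⟨i, hi1, hi2, hi3⟩
      refine ⟨i, hi1, by omega, ?_⟩
      apply String.toList_inj.mp
      rw [hjoin_take i, hi3]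
    · rintro ⟨i, hi1, hi2, rfl⟩
      exact ⟨i, hi1, by omega, hjoin_take i⟩
  constructor
  · rintro ⟨h, hmem, hp⟩
    obtain ⟨i, hi1, hi2, rfl⟩ := (hcond h).mp hp
    exact ⟨i, hi1, hi2, List.contains_iff_mem.mpr hmem⟩
  · rintro ⟨i, hi1, hi2, hc⟩
    exact ⟨_, List.contains_iff_mem.mp hc, (hcond _).mpr ⟨i, hi1, hi2, rfl⟩⟩

-- B's main loop computes "filter, map strip, take what is still missing to six"
theorem pv_loopB_eq (heads : PySem.Set String) (cmds out : List String) (h6 : out.length ≤ 6) :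
    pvLoopB heads out cmds =
      out ++ ((cmds.filter (fun raw =>
          PySem.Str.startswith (PySem.Str.strip raw) "/" &&
            pvScanB heads none (pvSplitSp (PySem.Str.strip raw)))).map PySem.Str.strip).take
        (6 - out.length) := by
  induction cmds generalizing out with
  | nil => simp [pvLoopB]
  | cons raw rest ih =>
    rw [pvLoopB]
    by_cases h61 : out.length = 6
    · simp [h61]
    · rw [if_neg (by simpa using h61)]
      by_cases hs : PySem.Str.startswith (PySem.Str.strip raw) "/" = true
      · rw [if_neg (by rw [hs]; decide)]
        by_cases hm : pvScanB heads none (pvSplitSp (PySem.Str.strip raw)) = true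
        · rw [if_pos hm, ih (out ++ [PySem.Str.strip raw]) (by simp; omega)]
          rw [List.filter_cons_of_pos (by simp only [hs, hm, Bool.and_self]; try decide)]
          simp only [List.map_cons, List.length_append, List.length_cons, List.length_nil]
          have h7 : 6 - out.length = (6 - (out.length + 1)) + 1 := by omega
          rw [h7, List.take_succ_cons]
          simp
        · rw [Bool.not_eq_true] at hm
          rw [hm, if_neg (by simp), ih out h6]
          rw [List.filter_cons_of_neg (by simp only [hs, hm, Bool.and_false]; try decide)]
      · rw [Bool.not_eq_true] at hs
        rw [if_pos (by rw [hs]; decide), ih out h6]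
        rw [List.filter_cons_of_neg (by simp only [hs, Bool.false_and]; try decide)]

-- A's main loop is "filter then map strip"
theorem pv_loopA_eq (allowed : PySem.Set String) (cmds out0 : List String) :
    cmds.foldl (fun out raw =>
      let s := PySem.Str.strip raw
      if !PySem.Str.startswith s "/" then out
      else if allowed.any (fun h => s == h || PySem.Str.startswith s (h ++ " ")) then out ++ [s]
      else out) out0 =
    out0 ++ ((cmds.filter (fun raw =>
        PySem.Str.startswith (PySem.Str.strip raw) "/" &&
          allowed.any (fun h => PySem.Str.strip raw == h ||
            PySem.Str.startswith (PySem.Str.strip raw) (h ++ " ")))).map PySem.Str.strip) := by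
  have h := PySem.List.foldl_append_if
    (fun raw => PySem.Str.startswith (PySem.Str.strip raw) "/" &&
      allowed.any (fun h => PySem.Str.strip raw == h ||
        PySem.Str.startswith (PySem.Str.strip raw) (h ++ " ")))
    (fun raw => PySem.Str.strip raw) (l := cmds) (acc := out0)
  rw [← h]
  apply PySem.List.foldl_congr_mem
  intro acc raw _
  dsimp only
  by_cases hs : PySem.Str.startswith (PySem.Str.strip raw) "/" = true
  · rw [hs]
    by_cases hm : allowed.any (fun h => PySem.Str.strip raw == h ||
        PySem.Str.startswith (PySem.Str.strip raw) (h ++ " ")) = true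
    · rw [hm]; simp
    · rw [Bool.not_eq_true] at hm
      rw [hm]; simp
  · rw [Bool.not_eq_true] at hs
    rw [hs]; simp

theorem filter_suggestions_eq (cmds : List String) (catalog : List (List (String × String))) :
    filter_suggestions_py cmds catalog = filter_suggestions_py_alt cmds catalog := by
  unfold filter_suggestions_py filter_suggestions_py_alt
  rw [pv_heads_eq]
  rw [pv_loopA_eq]
  rw [pv_loopB_eq _ _ _ (by simp)]
  simp only [List.nil_append, List.length_nil, Nat.sub_zero]
  rw [List.filter_congr (fun raw _ => by rw [pv_decide_eq] :
    ∀ raw ∈ cmds, (PySem.Str.startswith (PySem.Str.strip raw) "/" &&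
      (pvAllowedA catalog).any (fun h => PySem.Str.strip raw == h ||
        PySem.Str.startswith (PySem.Str.strip raw) (h ++ " "))) =
      (PySem.Str.startswith (PySem.Str.strip raw) "/" &&
        pvScanB (pvAllowedA catalog) none (pvSplitSp (PySem.Str.strip raw))))]

-- ===== VERDICT (by name: the statement is the Claim_ definition above) =====
theorem filter_suggestions_py_spec : Claim_equal_filter_suggestions_py := by
  intro cmds catalog _
  exact filter_suggestions_eq cmds catalog
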